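-- pv_equiv track=rewrite | github.com/Danae-Gielisse/Scalable_Product_Duplicate_Detection | performance.py | evaluate_duplicates_with_product_count
-- ===== SOURCE A (Python) =====
-- def evaluate_duplicates_with_product_count(true_duplicates, predicted_duplicates, total_products):
--     true_positives = 0
--     false_positives = 0
--     false_negatives = 0
--
--     true_duplicates_set = set(true_duplicates)
--     predicted_duplicates_set = set(predicted_duplicates)
--
--     total_combinations = total_products * (total_products - 1) // 2
--
--     for pair in predicted_duplicates_set:
--         if pair in true_duplicates_set:
--             true_positives += 1
--         else:
--             false_positives += 1
--
--     for pair in true_duplicates_set: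
--         if pair not in predicted_duplicates_set:
--             false_negatives += 1
--
--     total_non_duplicates = total_combinations - len(true_duplicates)
--
--     true_negatives = total_non_duplicates - false_positives - false_negatives - true_positives
--
--     return true_positives, false_positives, true_negatives, false_negatives
-- ===== SOURCE B (Python) =====
-- def evaluate_duplicates_with_product_count(true_duplicates, predicted_duplicates, total_products):
--     # Single tag map: for each pair, bit 1 = appears in true, bit 2 = appears in predicted.
--     status = {}
--     for pair in true_duplicates:
--         status[pair] = 1
--     for pair in predicted_duplicates:
--         status[pair] = status.get(pair, 0) | 2
--     true_positives = 0
--     false_positives = 0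
--     false_negatives = 0
--     for tag in status.values():
--         if tag == 3:
--             true_positives += 1
--         elif tag == 2:
--             false_positives += 1
--         else:
--             false_negatives += 1
--     true_negatives = (total_products * (total_products - 1) // 2
--                       - len(true_duplicates)
--                       - false_positives - false_negatives - true_positives)
--     return true_positives, false_positives, true_negatives, false_negatives
-- ===== Notes on version B (the rewrite author's own statement) =====
-- stated objective: alternative
-- what changed: Instead of building two sets and running two membership-test loops, B builds a single tag dictionary in one merge pass (bit 1 = pair in true_duplicates, bit 2 = in predicted_duplicates) and derives tp/fp/fn from one tally over its values; the true-negative closed form is kept.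
import Mathlib
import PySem

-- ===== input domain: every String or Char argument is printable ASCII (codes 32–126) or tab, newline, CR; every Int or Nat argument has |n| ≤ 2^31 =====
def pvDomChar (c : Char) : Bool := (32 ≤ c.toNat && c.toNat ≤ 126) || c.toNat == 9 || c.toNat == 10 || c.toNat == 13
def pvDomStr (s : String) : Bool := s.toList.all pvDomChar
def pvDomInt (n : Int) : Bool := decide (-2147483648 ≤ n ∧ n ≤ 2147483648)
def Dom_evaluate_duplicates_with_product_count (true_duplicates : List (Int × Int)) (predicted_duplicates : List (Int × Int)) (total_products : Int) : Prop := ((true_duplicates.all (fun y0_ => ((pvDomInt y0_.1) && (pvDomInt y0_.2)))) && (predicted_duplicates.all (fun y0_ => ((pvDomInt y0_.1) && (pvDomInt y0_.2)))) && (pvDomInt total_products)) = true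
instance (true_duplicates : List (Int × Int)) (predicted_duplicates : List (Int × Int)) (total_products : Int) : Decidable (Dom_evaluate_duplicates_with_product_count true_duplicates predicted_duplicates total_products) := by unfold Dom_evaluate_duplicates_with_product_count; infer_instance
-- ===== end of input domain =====

-- B replaces A's two sets and two membership-test loops by ONE tag dictionary (bit 1 = in true, bit 2 = in predicted) and a single tally over its values; objective: alternative.


-- ===== PORT A =====
def evaluate_duplicates_with_product_count (true_duplicates : List (Int × Int)) (predicted_duplicates : List (Int × Int)) (total_products : Int) : Int × Int × Int × Int :=
  let true_duplicates_set := PySem.Set.ofList true_duplicates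
  let predicted_duplicates_set := PySem.Set.ofList predicted_duplicates
  let total_combinations := PySem.Int.floordiv (total_products * (total_products - 1)) 2
  -- for pair in predicted_duplicates_set: tp/fp counting loop
  let tpfp := predicted_duplicates_set.foldl
    (fun (s : Int × Int) pair =>
      if PySem.Set.contains true_duplicates_set pair then (s.1 + 1, s.2) else (s.1, s.2 + 1))
    ((0 : Int), (0 : Int))
  let true_positives := tpfp.1
  let false_positives := tpfp.2
  -- for pair in true_duplicates_set: fn counting loop
  let false_negatives := true_duplicates_set.foldl
    (fun (fn : Int) pair =>
      if !(PySem.Set.contains predicted_duplicates_set pair) then fn + 1 else fn)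
    (0 : Int)
  let total_non_duplicates := total_combinations - PySem.List.len true_duplicates
  let true_negatives := total_non_duplicates - false_positives - false_negatives - true_positives
  (true_positives, false_positives, true_negatives, false_negatives)

-- ===== PORT B =====
def evaluate_duplicates_with_product_count_alt (true_duplicates : List (Int × Int)) (predicted_duplicates : List (Int × Int)) (total_products : Int) : Int × Int × Int × Int :=
  -- status = {}; for pair in true_duplicates: status[pair] = 1
  let status1 := true_duplicates.foldl (fun (d : PySem.Dict (Int × Int) Int) pair => d.insert pair 1) PySem.Dict.empty
  -- for pair in predicted_duplicates: status[pair] = status.get(pair, 0) | 2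
  let status := predicted_duplicates.foldl (fun (d : PySem.Dict (Int × Int) Int) pair => d.insert pair (PySem.Int.bor (d.getD pair 0) 2)) status1
  -- for tag in status.values(): tally tp/fp/fn
  let tally := status.values.foldl
    (fun (s : Int × Int × Int) tag =>
      if tag == 3 then (s.1 + 1, s.2.1, s.2.2)
      else if tag == 2 then (s.1, s.2.1 + 1, s.2.2)
      else (s.1, s.2.1, s.2.2 + 1))
    ((0 : Int), (0 : Int), (0 : Int))
  let true_positives := tally.1
  let false_positives := tally.2.1
  let false_negatives := tally.2.2
  let true_negatives := PySem.Int.floordiv (total_products * (total_products - 1)) 2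
      - PySem.List.len true_duplicates
      - false_positives - false_negatives - true_positives
  (true_positives, false_positives, true_negatives, false_negatives)

-- ===== PRECONDITION & SPEC =====
def Spec_evaluate_duplicates_with_product_count (true_duplicates : List (Int × Int)) (predicted_duplicates : List (Int × Int)) (total_products : Int) (out : Int × Int × Int × Int) : Prop := out = evaluate_duplicates_with_product_count_alt true_duplicates predicted_duplicates total_products
instance (true_duplicates : List (Int × Int)) (predicted_duplicates : List (Int × Int)) (total_products : Int) (out : Int × Int × Int × Int) : Decidable (Spec_evaluate_duplicates_with_product_count true_duplicates predicted_duplicates total_products out) := by unfold Spec_evaluate_duplicates_with_product_count; infer_instance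

-- ===== CLAIM (what is proved, stated in full; the proofs are below) =====
def Claim_equal_evaluate_duplicates_with_product_count : Prop := ∀ (true_duplicates : List (Int × Int)) (predicted_duplicates : List (Int × Int)) (total_products : Int), Dom_evaluate_duplicates_with_product_count true_duplicates predicted_duplicates total_products → Spec_evaluate_duplicates_with_product_count true_duplicates predicted_duplicates total_products (evaluate_duplicates_with_product_count true_duplicates predicted_duplicates total_products)

-- ===== LEMMAS AND PROOFS =====

-- the first B loop writes tag 1 at every key of true_duplicates
lemma getD_foldl_insert_one (l : List (Int × Int)) (d : PySem.Dict (Int × Int) Int) (k : Int × Int) :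
    (l.foldl (fun d pair => d.insert pair (1 : Int)) d).getD k 0
      = if k ∈ l then (1 : Int) else d.getD k 0 := by
  induction l generalizing d with
  | nil => simp
  | cons x xs ih =>
    simp only [List.foldl_cons, ih, PySem.Dict.getD_insert, List.mem_cons]
    by_cases hx : k = x <;> by_cases hm : k ∈ xs <;> simp [hx, hm]

-- the second B loop or's bit 2 into every key of predicted_duplicates (tags stay in {0,1,2,3})
lemma getD_foldl_bor_two (l : List (Int × Int)) (d : PySem.Dict (Int × Int) Int) (k : Int × Int)
    (hd : ∀ k', d.getD k' 0 = 0 ∨ d.getD k' 0 = 1 ∨ d.getD k' 0 = 2 ∨ d.getD k' 0 = 3) :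
    (l.foldl (fun d pair => d.insert pair (PySem.Int.bor (d.getD pair 0) 2)) d).getD k 0
      = if k ∈ l then PySem.Int.bor (d.getD k 0) 2 else d.getD k 0 := by
  induction l generalizing d with
  | nil => simp
  | cons x xs ih =>
    simp only [List.foldl_cons, List.mem_cons]
    have hd' : ∀ k', (d.insert x (PySem.Int.bor (d.getD x 0) 2)).getD k' 0 = 0 ∨
        (d.insert x (PySem.Int.bor (d.getD x 0) 2)).getD k' 0 = 1 ∨
        (d.insert x (PySem.Int.bor (d.getD x 0) 2)).getD k' 0 = 2 ∨
        (d.insert x (PySem.Int.bor (d.getD x 0) 2)).getD k' 0 = 3 := by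
      intro k'; rw [PySem.Dict.getD_insert]; split
      · rcases hd x with h | h | h | h <;> rw [h] <;> decide
      · exact hd k'
    rw [ih _ hd', PySem.Dict.getD_insert]
    by_cases hx : k = x
    · subst hx
      rcases hd k with h | h | h | h <;> rw [h] <;> by_cases hm : k ∈ xs <;> simp [hm] <;> decide
    · simp [hx]

-- values of a nodup-keyed dict are its getD's over its keys
lemma values_eq_map_getD (d : PySem.Dict (Int × Int) Int) (h : (PySem.Dict.keys d).Nodup) :
    PySem.Dict.values d = (PySem.Dict.keys d).map (fun k => d.getD k 0) := by
  show d.items.map (·.2) = (d.items.map (·.1)).map (fun k => d.getD k 0)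
  rw [List.map_map]
  refine List.map_congr_left (fun q hq => ?_)
  obtain ⟨k, v⟩ := q
  exact (PySem.Dict.getD_of_mem_items _ hq h 0).symm

-- the tag B's dictionary ends up holding at key k
def pvTag (t p : List (Int × Int)) (k : Int × Int) : Int :=
  if k ∈ p then (if k ∈ t then 3 else 2) else (if k ∈ t then 1 else 0)

-- characterisation of B's dictionary after both loops
lemma values_status (t p : List (Int × Int)) :
    ∃ K : List (Int × Int), K.Nodup ∧ (∀ x, x ∈ K ↔ x ∈ t ∨ x ∈ p) ∧
      PySem.Dict.values (p.foldl (fun (d : PySem.Dict (Int × Int) Int) pair => d.insert pair (PySem.Int.bor (d.getD pair 0) 2))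
        (t.foldl (fun (d : PySem.Dict (Int × Int) Int) pair => d.insert pair 1) PySem.Dict.empty))
        = K.map (pvTag t p) := by
  set d1 := t.foldl (fun (d : PySem.Dict (Int × Int) Int) pair => d.insert pair 1) PySem.Dict.empty with hd1
  set d2 := p.foldl (fun (d : PySem.Dict (Int × Int) Int) pair => d.insert pair (PySem.Int.bor (d.getD pair 0) 2)) d1 with hd2
  have hkeys : d2.keys = PySem.Set.update (PySem.Set.ofList t) p := by
    rw [hd2, PySem.Dict.keys_foldl_insert, hd1, PySem.Dict.keys_foldl_insert]
    simp [PySem.Set.update_nil_left]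
  have hnodup : d2.keys.Nodup := by
    rw [hkeys]; exact PySem.Set.nodup_update _ _ (PySem.Set.nodup_ofList t)
  have hget1 : ∀ k, d1.getD k 0 = if k ∈ t then 1 else 0 := by
    intro k; rw [hd1, getD_foldl_insert_one]; simp
  have hget : ∀ k, d2.getD k 0 = pvTag t p k := by
    intro k
    rw [hd2, getD_foldl_bor_two _ _ _ (fun k' => by rw [hget1 k']; split <;> decide)]
    rw [hget1 k]
    unfold pvTag
    by_cases hp : k ∈ p <;> by_cases ht : k ∈ t <;> simp [hp, ht] <;> decide
  refine ⟨d2.keys, hnodup, ?_, ?_⟩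
  · intro x; rw [hkeys]
    simp [PySem.Set.mem_update, PySem.Set.mem_ofList]
  · rw [values_eq_map_getD _ hnodup]
    exact List.map_congr_left (fun k _ => hget k)

-- countP over a nodup list restricted by a filter equals countP over any nodup list with that membership
lemma countP_restrict (K L : List (Int × Int)) (hK : K.Nodup) (hL : L.Nodup)
    (q c : (Int × Int) → Bool) (hmem : ∀ x, x ∈ L ↔ x ∈ K ∧ q x = true) :
    K.countP (fun k => c k && q k) = L.countP c := by
  rw [← List.countP_filter]
  exact ((List.perm_ext_iff_of_nodup (hK.filter q) hL).mpr
    (by intro x; simp [List.mem_filter, hmem])).countP_eq c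

-- A's tp/fp loop is a pair of countP's
lemma foldl_pair_count {α : Type} (c : α → Bool) (l : List α) (a b : Int) :
    l.foldl (fun (s : Int × Int) x => if c x then (s.1 + 1, s.2) else (s.1, s.2 + 1)) (a, b)
      = (a + (l.countP c : Int), b + (l.countP (fun x => !c x) : Int)) := by
  induction l generalizing a b with
  | nil => simp
  | cons x xs ih =>
    by_cases h : c x = true <;> simp [h, ih] <;> ring_nf

-- B's tally loop is a triple of countP's
lemma foldl_triple_count (l : List Int) (a b c : Int) :
    l.foldl (fun (s : Int × Int × Int) tag =>
      if tag == 3 then (s.1 + 1, s.2.1, s.2.2)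
      else if tag == 2 then (s.1, s.2.1 + 1, s.2.2)
      else (s.1, s.2.1, s.2.2 + 1)) (a, b, c)
      = (a + (l.countP (fun v => v == 3) : Int),
         b + (l.countP (fun v => v == 2) : Int),
         c + (l.countP (fun v => !(v == 3) && !(v == 2)) : Int)) := by
  induction l generalizing a b c with
  | nil => simp
  | cons x xs ih =>
    simp only [List.foldl_cons]
    by_cases h3 : x = 3
    · rw [if_pos (by simp [h3]), ih]
      simp [h3]; ring
    · by_cases h2 : x = 2
      · rw [if_neg (by simp [h3]), if_pos (by simp [h2]), ih]
        simp [h2]; ring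
      · rw [if_neg (by simp [h3]), if_neg (by simp [h2]), ih]
        simp [h2, h3]; ring

lemma contains_ofList_eq (l : List (Int × Int)) (x : Int × Int) :
    PySem.Set.contains (PySem.Set.ofList l) x = decide (x ∈ l) := by
  by_cases h : x ∈ l <;> simp [h, PySem.Set.mem_ofList]

lemma eval_eq_alt (t p : List (Int × Int)) (n : Int) :
    evaluate_duplicates_with_product_count t p n = evaluate_duplicates_with_product_count_alt t p n := by
  unfold evaluate_duplicates_with_product_count evaluate_duplicates_with_product_count_alt
  obtain ⟨K, hK, hmem, hvals⟩ := values_status t p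
  simp only [hvals, foldl_pair_count, PySem.List.foldl_count_if, foldl_triple_count,
    List.countP_map, Function.comp_def, zero_add, contains_ofList_eq]
  have h3 : K.countP (fun k => pvTag t p k == 3) = (PySem.Set.ofList p).countP (fun x => decide (x ∈ t)) := by
    rw [List.countP_congr (q := fun a => decide (a ∈ t) && decide (a ∈ p)) (fun a _ => by
      unfold pvTag; by_cases hp : a ∈ p <;> by_cases ht : a ∈ t <;> simp [hp, ht])]
    exact countP_restrict K (PySem.Set.ofList p) hK (PySem.Set.nodup_ofList p)
      (fun k => decide (k ∈ p)) (fun k => decide (k ∈ t))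
      (fun x => by simp [PySem.Set.mem_ofList, hmem]; tauto)
  have h2 : K.countP (fun k => pvTag t p k == 2) = (PySem.Set.ofList p).countP (fun x => !decide (x ∈ t)) := by
    rw [List.countP_congr (q := fun a => !decide (a ∈ t) && decide (a ∈ p)) (fun a _ => by
      unfold pvTag; by_cases hp : a ∈ p <;> by_cases ht : a ∈ t <;> simp [hp, ht])]
    exact countP_restrict K (PySem.Set.ofList p) hK (PySem.Set.nodup_ofList p)
      (fun k => decide (k ∈ p)) (fun k => !decide (k ∈ t))
      (fun x => by simp [PySem.Set.mem_ofList, hmem]; tauto)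
  have h1 : K.countP (fun k => !(pvTag t p k == 3) && !(pvTag t p k == 2)) = (PySem.Set.ofList t).countP (fun x => !decide (x ∈ p)) := by
    rw [List.countP_congr (q := fun a => !decide (a ∈ p) && decide (a ∈ t)) (fun a ha => by
      have hK' := (hmem a).mp ha
      unfold pvTag; by_cases hp : a ∈ p <;> by_cases ht : a ∈ t <;> simp [hp, ht] <;> tauto)]
    exact countP_restrict K (PySem.Set.ofList t) hK (PySem.Set.nodup_ofList t)
      (fun k => decide (k ∈ t)) (fun k => !decide (k ∈ p))
      (fun x => by simp [PySem.Set.mem_ofList, hmem]; tauto)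
  rw [h3, h2, h1]

-- ===== VERDICT (by name: the statement is the Claim_ definition above) =====
theorem evaluate_duplicates_with_product_count_spec : Claim_equal_evaluate_duplicates_with_product_count := by
  intro t p n _
  unfold Spec_evaluate_duplicates_with_product_count
  exact eval_eq_alt t p n
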